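-- pv_equiv track=rewrite | github.com/Wirayabovorn007/PSCP-2024 | mac.py | case3
-- ===== SOURCE A (Python) =====
-- def case3(t,b):
--     '''ch'''
--     n = t.count('.')
--     k = t.replace('.','')
--     c = 0
--     k_state = 0
--     for i in k:
--         if i in b:
--             k_state+=1
--     t = t.split('.')
--     if k_state == 12:
--         for i in t:
--             if len(i) == 4:
--                 c+=1
--         if n == 2 and c == 3:
--             return True
--     return False
-- ===== SOURCE B (Python) =====
-- def case3(t, b):
--     parts = t.split('.')
--     return len(parts) == 3 and all(
--         len(p) == 4 and all(ch in b for ch in p) for p in parts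
--     )
-- ===== Notes on version B (the rewrite author's own statement) =====
-- stated objective: simpler
-- what changed: A makes three independent global passes (dot count, per-character membership tally over the whole dot-stripped string, per-part length tally) and compares the tallies to 12/2/3; B splits once and validates locally per segment (exactly 3 parts, each of length 4 with every character in b), short-circuiting as soon as a check fails, so invalid inputs skip the O(|t|*|b|) membership scan A always performs.
import Mathlib
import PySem

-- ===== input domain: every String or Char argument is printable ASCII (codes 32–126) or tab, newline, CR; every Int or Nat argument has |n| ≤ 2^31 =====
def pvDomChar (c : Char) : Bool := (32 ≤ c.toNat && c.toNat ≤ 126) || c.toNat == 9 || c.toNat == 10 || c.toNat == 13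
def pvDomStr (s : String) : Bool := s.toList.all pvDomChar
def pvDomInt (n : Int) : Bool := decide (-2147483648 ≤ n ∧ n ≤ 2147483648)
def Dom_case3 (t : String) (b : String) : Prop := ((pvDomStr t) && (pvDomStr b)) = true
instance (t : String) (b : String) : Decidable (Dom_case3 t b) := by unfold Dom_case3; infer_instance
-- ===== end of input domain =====

-- B replaces A's three independent global tallies (dot count, membership count over the
-- dot-stripped string, per-part length count) by a single split with local per-segment
-- validation; objective: simpler.


-- ===== PORT A =====
-- Python's one-char membership test 'i in b' is ported exactly as PySem.Str.isIn of the singleton string.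
-- t.split('.') is PySem.Str.split?; the separator "." is nonempty, so split? is always `some` and .getD [] is exact.
def case3 (t : String) (b : String) : Bool :=
  let n := PySem.Str.count t "."
  let k := PySem.Str.replace t "." ""
  let k_state : Int :=
    k.toList.foldl (fun ks i => if PySem.Str.isIn (String.ofList [i]) b then ks + 1 else ks) 0
  let parts := (PySem.Str.split? t ".").getD []
  if k_state == 12 then
    let c : Int := parts.foldl (fun c i => if PySem.Str.len i == 4 then c + 1 else c) 0
    if n == 2 && c == 3 then true else false
  else false

-- ===== PORT B =====
def case3_alt (t : String) (b : String) : Bool :=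
  let parts := (PySem.Str.split? t ".").getD []
  parts.length == 3 &&
    parts.all (fun p =>
      PySem.Str.len p == 4 && p.toList.all (fun ch => PySem.Str.isIn (String.ofList [ch]) b))

-- ===== PRECONDITION & SPEC =====
def Spec_case3 (t : String) (b : String) (out : Bool) : Prop := out = case3_alt t b
instance (t : String) (b : String) (out : Bool) : Decidable (Spec_case3 t b out) := by unfold Spec_case3; infer_instance

-- ===== CLAIM (what is proved, stated in full; the proofs are below) =====
def Claim_equal_case3 : Prop := ∀ (t : String) (b : String), Dom_case3 t b → Spec_case3 t b (case3 t b)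

-- ===== LEMMAS AND PROOFS =====

-- structural single-character split, the proof-side characterisation of t.split('.')
def splitChar (c : Char) : List Char → List (List Char)
  | [] => [[]]
  | x :: t =>
    if x = c then [] :: splitChar c t
    else
      match splitChar c t with
      | [] => [[x]]
      | p :: ps => (x :: p) :: ps

theorem splitChar_ne_nil (c : Char) (l : List Char) : splitChar c l ≠ [] := by
  induction l with
  | nil => simp [splitChar]
  | cons x t ih =>
    simp only [splitChar]
    split_ifs
    · simp
    · cases h : splitChar c t <;> simp

theorem splitOn_go_spec (c : Char) (l cur : List Char) (acc : List (List Char)) (f : Nat)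
    (h : l.length ≤ f) :
    PySem.Chars.splitOn.go [c] f l cur acc =
      acc.reverse ++
        (match splitChar c l with
         | [] => [cur.reverse]
         | p :: ps => (cur.reverse ++ p) :: ps) := by
  induction l generalizing f cur acc with
  | nil =>
    cases f <;> rw [PySem.Chars.splitOn.go] <;> simp [splitChar]
  | cons x t ih =>
    cases f with
    | zero => simp at h
    | succ f =>
      rw [PySem.Chars.splitOn.go]
      have hf : t.length ≤ f := by simpa using h
      by_cases hx : x = c
      · subst hx
        have hpre : [x].isPrefixOf (x :: t) = true := by simp [List.isPrefixOf]
        simp only [hpre, if_pos, List.length_cons, List.length_nil, List.drop_succ_cons,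
          List.drop_zero]
        rw [ih _ _ _ hf]
        cases hs : splitChar x t with
        | nil => exact absurd hs (splitChar_ne_nil x t)
        | cons p ps => simp [splitChar, hs]
      · have hpre : [c].isPrefixOf (x :: t) = false := by
          simp [List.isPrefixOf]
          exact fun hc => absurd hc.symm hx
        simp only [hpre, Bool.false_eq_true, if_false]
        rw [ih _ _ _ hf]
        cases hs : splitChar c t with
        | nil => exact absurd hs (splitChar_ne_nil c t)
        | cons p ps => simp [splitChar, hs, hx]

theorem splitOn_single (c : Char) (s : List Char) :
    PySem.Chars.splitOn s [c] = splitChar c s := by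
  unfold PySem.Chars.splitOn
  rw [splitOn_go_spec c s [] [] (s.length + 1) (by omega)]
  cases hs : splitChar c s with
  | nil => exact absurd hs (splitChar_ne_nil c s)
  | cons p ps => simp

theorem count_go_spec (c : Char) (l : List Char) (acc f : Nat) (h : l.length ≤ f) :
    PySem.Chars.count.go [c] f l acc = acc + l.count c := by
  induction l generalizing f acc with
  | nil => cases f <;> rw [PySem.Chars.count.go] <;> simp
  | cons x t ih =>
    cases f with
    | zero => simp at h
    | succ f =>
      rw [PySem.Chars.count.go]
      have hf : t.length ≤ f := by simpa using h
      by_cases hx : x = c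
      · subst hx
        have hpre : [x].isPrefixOf (x :: t) = true := by simp [List.isPrefixOf]
        simp only [hpre, if_pos, List.length_singleton, List.drop_succ_cons, List.drop_zero]
        rw [ih _ _ hf]
        simp
        omega
      · have hpre : [c].isPrefixOf (x :: t) = false := by
          simp [List.isPrefixOf]
          exact fun hc => absurd hc.symm hx
        simp only [hpre, Bool.false_eq_true, if_false]
        rw [ih _ _ hf]
        simp [hx]

theorem count_single (c : Char) (s : List Char) :
    PySem.Chars.count s [c] = s.count c := by
  unfold PySem.Chars.count
  simpa using count_go_spec c s 0 s.length le_rfl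

theorem replace_go_spec (c : Char) (l acc : List Char) (f : Nat) (h : l.length ≤ f) :
    PySem.Chars.replace.go [c] [] f l acc = acc.reverse ++ l.filter (fun x => !(x == c)) := by
  induction l generalizing f acc with
  | nil => cases f <;> rw [PySem.Chars.replace.go] <;> simp
  | cons x t ih =>
    cases f with
    | zero => simp at h
    | succ f =>
      rw [PySem.Chars.replace.go]
      have hf : t.length ≤ f := by simpa using h
      by_cases hx : x = c
      · subst hx
        have hpre : [x].isPrefixOf (x :: t) = true := by simp [List.isPrefixOf]
        simp only [hpre, if_pos, List.length_singleton, List.drop_succ_cons, List.drop_zero]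
        rw [ih _ _ hf]
        simp
      · have hpre : [c].isPrefixOf (x :: t) = false := by
          simp [List.isPrefixOf]
          exact fun hc => absurd hc.symm hx
        simp only [hpre, Bool.false_eq_true, if_false]
        rw [ih _ _ hf]
        simp [hx]

theorem replace_single (c : Char) (s : List Char) :
    PySem.Chars.replace s [c] [] = s.filter (fun x => !(x == c)) := by
  unfold PySem.Chars.replace
  simpa using replace_go_spec c s [] s.length le_rfl

theorem length_splitChar (c : Char) (s : List Char) :
    (splitChar c s).length = s.count c + 1 := by
  induction s with
  | nil => simp [splitChar]
  | cons x t ih =>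
    simp only [splitChar]
    split_ifs with hx
    · subst hx; simp [ih]
    · cases hs : splitChar c t with
      | nil => exact absurd hs (splitChar_ne_nil c t)
      | cons p ps =>
        have : (p :: ps).length = t.count c + 1 := by rw [← hs]; exact ih
        simpa [List.count_cons, hx] using this

theorem flatten_splitChar (c : Char) (s : List Char) :
    (splitChar c s).flatten = s.filter (fun x => !(x == c)) := by
  induction s with
  | nil => simp [splitChar]
  | cons x t ih =>
    simp only [splitChar]
    split_ifs with hx
    · subst hx; simp [ih]
    · cases hs : splitChar c t with
      | nil => exact absurd hs (splitChar_ne_nil c t)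
      | cons p ps =>
        have : (p :: ps).flatten = t.filter (fun x => !(x == c)) := by rw [← hs]; exact ih
        simp only [List.flatten_cons] at this
        simp [hx, List.flatten_cons, ← this]

-- the central combinatorial equivalence: the three global tallies pin down exactly
-- "3 parts, each of length 4, every character accepted"
theorem main_iff (P : List (List Char)) (inb : Char → Bool) :
    (P.flatten.countP inb = 12 ∧ P.length = 3 ∧ P.countP (fun p => p.length == 4) = 3) ↔
      (P.length = 3 ∧ ∀ p ∈ P, p.length = 4 ∧ ∀ ch ∈ p, inb ch = true) := by
  constructor
  · rintro ⟨h12, h3, hc⟩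
    have hall : ∀ p ∈ P, (fun p : List Char => p.length == 4) p = true :=
      List.countP_eq_length.mp (by rw [hc, h3])
    have hlen4 : ∀ p ∈ P, p.length = 4 := fun p hp => by simpa using hall p hp
    have hmap : P.map List.length = List.replicate 3 4 :=
      List.eq_replicate_iff.mpr ⟨by simp [h3], by
        intro a ha
        obtain ⟨p, hp, rfl⟩ := List.mem_map.mp ha
        exact hlen4 p hp⟩
    have hflen : P.flatten.length = 12 := by
      rw [List.length_flatten, hmap]; simp
    have hinb : ∀ ch ∈ P.flatten, inb ch = true :=
      List.countP_eq_length.mp (by rw [h12, hflen])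
    exact ⟨h3, fun p hp => ⟨hlen4 p hp, fun ch hch => hinb ch (List.mem_flatten.mpr ⟨p, hp, hch⟩)⟩⟩
  · rintro ⟨h3, hall⟩
    have hlen4 : ∀ p ∈ P, p.length = 4 := fun p hp => (hall p hp).1
    have hmap : P.map List.length = List.replicate 3 4 :=
      List.eq_replicate_iff.mpr ⟨by simp [h3], by
        intro a ha
        obtain ⟨p, hp, rfl⟩ := List.mem_map.mp ha
        exact hlen4 p hp⟩
    have hflen : P.flatten.length = 12 := by
      rw [List.length_flatten, hmap]; simp
    refine ⟨?_, h3, ?_⟩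
    · rw [List.countP_eq_length.mpr, hflen]
      intro ch hch
      obtain ⟨p, hp, hchp⟩ := List.mem_flatten.mp hch
      exact (hall p hp).2 ch hchp
    · rw [List.countP_eq_length.mpr, h3]
      intro p hp
      simp [hlen4 p hp]

-- ===== VERDICT (by name: the statement is the Claim_ definition above) =====
theorem case3_spec : Claim_equal_case3 := by
  intro t b _
  unfold Spec_case3 case3 case3_alt
  have hdot : ".".toList = ['.'] := rfl
  have hempty : "".toList = ([] : List Char) := rfl
  have hsplit : PySem.Str.split? t "." = some ((splitChar '.' t.toList).map String.ofList) := by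
    simp [PySem.Str.split?, PySem.Chars.split?, hdot, splitOn_single]
  have hif : ∀ x y : Bool, (if x = true then (if y = true then true else false) else false) = (x && y) := by decide
  simp only [hsplit, Option.getD_some, PySem.Str.count_eq, hdot, count_single,
    PySem.List.foldl_count_if, hif]
  rw [Bool.eq_iff_iff]
  simp only [Bool.and_eq_true, beq_iff_eq, List.all_eq_true, List.length_map]
  rw [PySem.Str.toList_replace, hdot, hempty, replace_single, ← flatten_splitChar,
    List.countP_map]
  have hofList : ∀ p : List Char, (String.ofList p).toList = p := fun p => by simp
  have hcp : List.countP ((fun x => PySem.Str.len x == 4) ∘ String.ofList) (splitChar '.' t.toList)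
      = List.countP (fun p => p.length == 4) (splitChar '.' t.toList) := by
    apply List.countP_congr
    intro p _
    simp [PySem.Str.len_eq]
    omega
  rw [hcp]
  have hlen := length_splitChar '.' t.toList
  have key := main_iff (splitChar '.' t.toList) (fun ch => PySem.Str.isIn (String.ofList [ch]) b)
  simp only [List.forall_mem_map, PySem.Str.len_eq, hofList, zero_add,
    show ∀ n : Nat, ((n : Int) = 12 ↔ n = 12) from fun n => by omega,
    show ∀ n : Nat, ((n : Int) = 3 ↔ n = 3) from fun n => by omega,
    show ∀ n : Nat, ((n : Int) = 4 ↔ n = 4) from fun n => by omega]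
  constructor
  · rintro ⟨h12, h2, h3⟩
    exact key.mp ⟨h12, by omega, h3⟩
  · rintro ⟨h3, hall⟩
    obtain ⟨h12, hl3, hc3⟩ := key.mpr ⟨h3, hall⟩
    exact ⟨h12, by omega, hc3⟩
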